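-- pv_equiv track=rewrite | github.com/aLexzzz430/Cognitive-OS | core/orchestration/structured_answer.py | _derive_color_map
-- ===== SOURCE A (Python) =====
-- from typing import Any, Callable, Dict, List, Optional, Sequence, Set, Tuple
--
-- Grid = List[List[int]]
--
-- def _derive_color_map(src: Grid, dst: Grid) -> Optional[Dict[int, int]]:
--     if len(src) != len(dst):
--         return None
--     mapping: Dict[int, int] = {}
--     for src_row, dst_row in zip(src, dst):
--         if len(src_row) != len(dst_row):
--             return None
--         for src_cell, dst_cell in zip(src_row, dst_row):
--             if src_cell in mapping and mapping[src_cell] != dst_cell: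
--                 return None
--             mapping[src_cell] = dst_cell
--     return mapping
-- ===== SOURCE B (Python) =====
-- from typing import Dict, List, Optional
--
-- Grid = List[List[int]]
--
-- def _derive_color_map(src: Grid, dst: Grid) -> Optional[Dict[int, int]]:
--     # Collect every (src_cell, dst_cell) pair into an insertion-ordered set,
--     # then decide consistency afterwards by counting distinct source colors.
--     if len(src) != len(dst):
--         return None
--     pairs: Dict = {}  # used as an insertion-ordered set of pairs
--     for src_row, dst_row in zip(src, dst):
--         if len(src_row) != len(dst_row):
--             return None
--         for p in zip(src_row, dst_row):
--             pairs[p] = None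
--     plist = list(pairs)
--     if len({s for s, _ in plist}) != len(plist):
--         return None
--     return dict(plist)
-- ===== Notes on version B (the rewrite author's own statement) =====
-- stated objective: alternative
-- what changed: B collects all (src_cell, dst_cell) pairs into an insertion-ordered set during one validation pass and decides consistency afterwards by comparing the number of distinct pairs with the number of distinct source colors, instead of A's inline per-cell conflict check against a growing mapping.
import Mathlib
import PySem

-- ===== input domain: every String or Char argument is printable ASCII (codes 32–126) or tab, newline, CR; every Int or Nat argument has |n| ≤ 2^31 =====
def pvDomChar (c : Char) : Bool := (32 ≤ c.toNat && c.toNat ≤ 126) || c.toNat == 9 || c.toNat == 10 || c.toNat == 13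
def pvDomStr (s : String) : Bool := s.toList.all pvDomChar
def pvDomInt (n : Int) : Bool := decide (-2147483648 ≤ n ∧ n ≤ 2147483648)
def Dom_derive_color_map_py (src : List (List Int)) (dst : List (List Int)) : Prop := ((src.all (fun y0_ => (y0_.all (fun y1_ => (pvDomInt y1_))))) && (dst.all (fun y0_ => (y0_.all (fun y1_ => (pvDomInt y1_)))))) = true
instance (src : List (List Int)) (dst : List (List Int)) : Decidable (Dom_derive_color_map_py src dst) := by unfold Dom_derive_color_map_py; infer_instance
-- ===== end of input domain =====

-- B replaces A's inline per-cell conflict check by collecting all cell pairs into an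
-- insertion-ordered set and verifying consistency afterwards by counting distinct source
-- colors (objective: alternative decomposition, same cost).

-- ===== PORT A =====
-- inner loop: for src_cell, dst_cell in zip(src_row, dst_row): …
def pvA_row : List (Int × Int) → PySem.Dict Int Int → Option (PySem.Dict Int Int)
  | [], m => some m
  | (s, d) :: rest, m =>
    match m.get? s with
    | some v => if v ≠ d then none else pvA_row rest (m.insert s d)
    | none => pvA_row rest (m.insert s d)

-- outer loop: for src_row, dst_row in zip(src, dst): …
def pvA_rows : List (List Int × List Int) → PySem.Dict Int Int → Option (PySem.Dict Int Int)
  | [], m => some m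
  | (sr, dr) :: rest, m =>
    if sr.length ≠ dr.length then none
    else
      match pvA_row (sr.zip dr) m with
      | none => none
      | some m' => pvA_rows rest m'

def derive_color_map_py (src : List (List Int)) (dst : List (List Int)) : Option (List (Int × Int)) :=
  if src.length ≠ dst.length then none
  else (pvA_rows (src.zip dst) PySem.Dict.empty).map PySem.Dict.items

-- ===== PORT B =====
-- collection loop of Source B: pairs[p] = None for every cell pair (dict used as ordered set)
def pvB_rows : List (List Int × List Int) → PySem.Set (Int × Int) → Option (PySem.Set (Int × Int))
  | [], ps => some ps
  | (sr, dr) :: rest, ps =>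
    if sr.length ≠ dr.length then none
    else pvB_rows rest ((sr.zip dr).foldl PySem.Set.add ps)

def derive_color_map_py_alt (src : List (List Int)) (dst : List (List Int)) : Option (List (Int × Int)) :=
  if src.length ≠ dst.length then none
  else
    match pvB_rows (src.zip dst) PySem.Set.empty with
    | none => none
    | some plist =>
      if (PySem.Set.ofList (plist.map Prod.fst)).length ≠ plist.length then none
      else some (PySem.Dict.ofList plist).items

-- ===== PRECONDITION & SPEC =====
def Spec_derive_color_map_py (src : List (List Int)) (dst : List (List Int)) (out : Option (List (Int × Int))) : Prop := out = derive_color_map_py_alt src dst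
instance (src : List (List Int)) (dst : List (List Int)) (out : Option (List (Int × Int))) : Decidable (Spec_derive_color_map_py src dst out) := by unfold Spec_derive_color_map_py; infer_instance

-- ===== CLAIM (what is proved, stated in full; the proofs are below) =====
def Claim_equal_derive_color_map_py : Prop := ∀ (src : List (List Int)) (dst : List (List Int)), Dom_derive_color_map_py src dst → Spec_derive_color_map_py src dst (derive_color_map_py src dst)

-- ===== LEMMAS AND PROOFS =====

-- membership in a set survives further additions
theorem pv_mem_foldl_add {α : Type} [BEq α] [LawfulBEq α] (l : List α) (ps : PySem.Set α) (a : α)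
    (h : a ∈ ps) : a ∈ l.foldl PySem.Set.add ps := by
  induction l generalizing ps with
  | nil => exact h
  | cons x xs ih => exact ih _ ((PySem.Set.mem_add ps x a).mpr (Or.inl h))

-- two pairs with the same first component and different second components kill Nodup of the firsts
theorem pv_not_nodup_fst {l : List (Int × Int)} {s v d : Int}
    (h1 : (s, v) ∈ l) (h2 : (s, d) ∈ l) (hne : v ≠ d) : ¬ (l.map Prod.fst).Nodup := by
  induction l with
  | nil => cases h1
  | cons a l ih =>
    intro hnd
    rw [List.map_cons, List.nodup_cons] at hnd
    rcases List.mem_cons.mp h1 with h1a | h1l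
    · rcases List.mem_cons.mp h2 with h2a | h2l
      · exact hne (congrArg Prod.snd (h1a.trans h2a.symm))
      · exact hnd.1 (by rw [← h1a]; exact List.mem_map.mpr ⟨(s, d), h2l, rfl⟩)
    · rcases List.mem_cons.mp h2 with h2a | h2l
      · exact hnd.1 (by rw [← h2a]; exact List.mem_map.mpr ⟨(s, v), h1l, rfl⟩)
      · exact ih h1l h2l hnd.2

theorem pv_ofList_sublist {α : Type} [BEq α] [LawfulBEq α] (l : List α) :
    (PySem.Set.ofList l).Sublist l := by
  induction l using List.reverseRecOn with
  | nil => simp [PySem.Set.ofList]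
  | append_singleton xs x ih =>
    rw [PySem.Set.ofList_append_singleton, PySem.Set.add_eq_ite]
    split
    · exact ih.trans (List.sublist_append_left _ _)
    · exact List.Sublist.append ih (List.Sublist.refl _)

theorem pv_ofList_len_ne {α : Type} [BEq α] [LawfulBEq α] (l : List α) (h : ¬ l.Nodup) :
    (PySem.Set.ofList l).length ≠ l.length := by
  intro hlen
  have heq : PySem.Set.ofList l = l := (pv_ofList_sublist l).eq_of_length hlen
  exact h (heq ▸ PySem.Set.nodup_ofList l)

-- dict(plist) on a list with distinct keys has exactly plist as its items
theorem pv_ofList_items (l : List (Int × Int)) (h : (l.map Prod.fst).Nodup) :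
    (PySem.Dict.ofList l).items = l := by
  have h2 := PySem.Dict.items_foldl_insert_fresh l Prod.fst Prod.snd
      (PySem.Dict.empty : PySem.Dict Int Int)
      (fun a _ => PySem.Dict.contains_empty a.1) h
  have h1 : (PySem.Dict.ofList l).items
      = (l.foldl (fun (d : PySem.Dict Int Int) a => d.insert (Prod.fst a) (Prod.snd a))
          PySem.Dict.empty).items := rfl
  rw [h1, h2]
  have h0 : (PySem.Dict.empty : PySem.Dict Int Int).items = [] := rfl
  rw [h0]
  simp

-- one row: A's inline-checked mapping versus B's pair set
theorem pv_row_lemma (cells : List (Int × Int)) (m : PySem.Dict Int Int) (ps : PySem.Set (Int × Int))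
    (hitems : m.items = ps) (hnd : m.keys.Nodup) :
    (∀ m', pvA_row cells m = some m' →
      m'.items = cells.foldl PySem.Set.add ps ∧ m'.keys.Nodup) ∧
    (pvA_row cells m = none →
      ∃ s v d, v ≠ d ∧ (s, v) ∈ cells.foldl PySem.Set.add ps ∧ (s, d) ∈ cells.foldl PySem.Set.add ps) := by
  induction cells generalizing m ps with
  | nil =>
    refine ⟨fun m' hm' => ?_, fun h => by simp [pvA_row] at h⟩
    simp [pvA_row] at hm'; subst hm'
    exact ⟨hitems, hnd⟩
  | cons c rest ih =>
    obtain ⟨s, d⟩ := c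
    have hfold : ((s, d) :: rest).foldl PySem.Set.add ps
        = rest.foldl PySem.Set.add (PySem.Set.add ps (s, d)) := rfl
    cases hg : m.get? s with
    | some v =>
      have hmem : (s, v) ∈ ps := hitems ▸ PySem.Dict.mem_items_of_get?_eq_some m hg
      by_cases hvd : v = d
      · subst hvd
        -- value already present and equal: mapping items and pair set are unchanged
        have hstep : pvA_row ((s, v) :: rest) m = pvA_row rest (m.insert s v) := by
          simp [pvA_row, hg]
        have hins : (m.insert s v).items = m.items := by
          have hcont : m.contains s = true := by
            rw [PySem.Dict.contains_eq_isSome_get?, hg]; rfl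
          rw [PySem.Dict.items_insert_of_contains m v hcont]
          have hid : ∀ p ∈ m.items, (if (p.1 == s) = true then ((s : Int), (v : Int)) else p) = p := by
            intro p hp
            by_cases hps : p.1 = s
            · have hgp : m.get? p.1 = some p.2 := PySem.Dict.get?_of_mem_items m hp hnd
              rw [hps, hg] at hgp
              obtain ⟨p1, p2⟩ := p
              simp_all
            · simp [hps]
          rw [List.map_congr_left hid]
          simp
        have hset : PySem.Set.add ps (s, v) = ps := PySem.Set.add_of_mem hmem
        have hknd : (m.insert s v).keys.Nodup := PySem.Dict.nodup_keys_insert m s v hnd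
        have hih := ih (m.insert s v) (PySem.Set.add ps (s, v)) (by rw [hins, hset, hitems]) hknd
        constructor
        · intro m' hm'
          rw [hstep] at hm'
          rw [hfold]
          exact hih.1 m' hm'
        · intro hnone
          rw [hstep] at hnone
          rw [hfold]
          exact hih.2 hnone
      · -- conflict: A returns None; B's pair set keeps both (s, v) and (s, d) forever
        have hstep : pvA_row ((s, d) :: rest) m = none := by
          simp [pvA_row, hg, hvd]
        constructor
        · intro m' hm'
          rw [hstep] at hm'; cases hm'
        · intro _
          rw [hfold]
          refine ⟨s, v, d, hvd, ?_, ?_⟩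
          · exact pv_mem_foldl_add rest _ _ ((PySem.Set.mem_add ps (s, d) (s, v)).mpr (Or.inl hmem))
          · exact pv_mem_foldl_add rest _ _ ((PySem.Set.mem_add ps (s, d) (s, d)).mpr (Or.inr rfl))
    | none =>
      -- fresh key: both sides append (s, d)
      have hstep : pvA_row ((s, d) :: rest) m = pvA_row rest (m.insert s d) := by
        simp [pvA_row, hg]
      have hcont : m.contains s = false := by
        rw [PySem.Dict.contains_eq_isSome_get?, hg]; rfl
      have hins : (m.insert s d).items = m.items ++ [(s, d)] :=
        PySem.Dict.items_insert_of_not_contains m d hcont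
      have hnotmem : (s, d) ∉ ps := by
        intro hin
        have hk : s ∈ m.keys := PySem.Dict.mem_keys_of_mem_items m (hitems ▸ hin)
        rw [← PySem.Dict.contains_iff_mem_keys] at hk
        rw [hcont] at hk; cases hk
      have hset : PySem.Set.add ps (s, d) = ps ++ [(s, d)] := PySem.Set.add_of_not_mem hnotmem
      have hknd : (m.insert s d).keys.Nodup := PySem.Dict.nodup_keys_insert m s d hnd
      have hih := ih (m.insert s d) (PySem.Set.add ps (s, d)) (by rw [hins, hset, hitems]) hknd
      constructor
      · intro m' hm'
        rw [hstep] at hm'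
        rw [hfold]
        exact hih.1 m' hm'
      · intro hnone
        rw [hstep] at hnone
        rw [hfold]
        exact hih.2 hnone

-- membership is monotone through B's remaining rows (when they succeed)
theorem pv_B_mono (rows : List (List Int × List Int)) (ps ps' : PySem.Set (Int × Int))
    (a : Int × Int) (h : pvB_rows rows ps = some ps') (ha : a ∈ ps) : a ∈ ps' := by
  induction rows generalizing ps with
  | nil => simp [pvB_rows] at h; exact h ▸ ha
  | cons r rest ih =>
    obtain ⟨sr, dr⟩ := r
    by_cases hl : sr.length = dr.length
    · have hstep : pvB_rows ((sr, dr) :: rest) ps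
          = pvB_rows rest ((sr.zip dr).foldl PySem.Set.add ps) := by
        simp [pvB_rows, hl]
      rw [hstep] at h
      exact ih _ h (pv_mem_foldl_add _ _ _ ha)
    · simp [pvB_rows, hl] at h

theorem pv_rows_lemma (rows : List (List Int × List Int)) (m : PySem.Dict Int Int)
    (ps : PySem.Set (Int × Int)) (hitems : m.items = ps) (hnd : m.keys.Nodup) :
    (∀ m', pvA_rows rows m = some m' → pvB_rows rows ps = some m'.items ∧ m'.keys.Nodup) ∧
    (pvA_rows rows m = none →
      pvB_rows rows ps = none ∨
      ∃ ps', pvB_rows rows ps = some ps' ∧ ∃ s v d, v ≠ d ∧ (s, v) ∈ ps' ∧ (s, d) ∈ ps') := by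
  induction rows generalizing m ps with
  | nil =>
    refine ⟨fun m' hm' => ?_, fun h => by simp [pvA_rows] at h⟩
    simp [pvA_rows] at hm'; subst hm'
    exact ⟨by simp [pvB_rows, hitems], hnd⟩
  | cons r rest ih =>
    obtain ⟨sr, dr⟩ := r
    by_cases hl : sr.length = dr.length
    · have hBstep : pvB_rows ((sr, dr) :: rest) ps
          = pvB_rows rest ((sr.zip dr).foldl PySem.Set.add ps) := by
        simp [pvB_rows, hl]
      have hrow := pv_row_lemma (sr.zip dr) m ps hitems hnd
      cases hA : pvA_row (sr.zip dr) m with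
      | some m₁ =>
        have hAstep : pvA_rows ((sr, dr) :: rest) m = pvA_rows rest m₁ := by
          simp [pvA_rows, hl, hA]
        obtain ⟨h₁, h₂⟩ := hrow.1 m₁ hA
        have hih := ih m₁ ((sr.zip dr).foldl PySem.Set.add ps) h₁ h₂
        constructor
        · intro m' hm'
          rw [hAstep] at hm'
          rw [hBstep]
          exact hih.1 m' hm'
        · intro hnone
          rw [hAstep] at hnone
          rw [hBstep]
          exact hih.2 hnone
      | none =>
        have hAstep : pvA_rows ((sr, dr) :: rest) m = none := by
          simp [pvA_rows, hl, hA]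
        obtain ⟨s, v, d, hvd, hv, hd⟩ := hrow.2 hA
        constructor
        · intro m' hm'
          rw [hAstep] at hm'; cases hm'
        · intro _
          rw [hBstep]
          cases hB : pvB_rows rest ((sr.zip dr).foldl PySem.Set.add ps) with
          | none => exact Or.inl rfl
          | some ps' =>
            exact Or.inr ⟨ps', rfl, s, v, d, hvd,
              pv_B_mono _ _ _ _ hB hv, pv_B_mono _ _ _ _ hB hd⟩
    · constructor
      · intro m' hm'; simp [pvA_rows, hl] at hm'
      · intro _; left; simp [pvB_rows, hl]

-- ===== VERDICT (by name: the statement is the Claim_ definition above) =====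
theorem derive_color_map_py_spec : Claim_equal_derive_color_map_py := by
  intro src dst _
  unfold Spec_derive_color_map_py derive_color_map_py derive_color_map_py_alt
  by_cases hlen : src.length = dst.length
  · rw [if_neg (by omega), if_neg (by omega)]
    have hmain := pv_rows_lemma (src.zip dst) PySem.Dict.empty PySem.Set.empty rfl
      PySem.Dict.nodup_keys_empty
    cases hA : pvA_rows (src.zip dst) PySem.Dict.empty with
    | some m' =>
      obtain ⟨hB, hknd⟩ := hmain.1 m' hA
      have hfst : (m'.items.map Prod.fst).Nodup := hknd
      have hok : (PySem.Set.ofList (m'.items.map Prod.fst)).length = (m'.items).length := by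
        rw [PySem.Set.ofList_eq_self_of_nodup _ hfst, List.length_map]
      rw [hB]
      simp [hok, pv_ofList_items m'.items hfst]
    | none =>
      rcases hmain.2 hA with hB | ⟨ps', hB, s, v, d, hvd, hv, hd⟩
      · rw [hB]; rfl
      · rw [hB]
        have hdup : ¬ (ps'.map Prod.fst).Nodup := pv_not_nodup_fst hv hd hvd
        have hne : (PySem.Set.ofList (ps'.map Prod.fst)).length ≠ ps'.length := by
          have := pv_ofList_len_ne (ps'.map Prod.fst) hdup
          simpa using this
        simp [hne]
  · rw [if_pos hlen, if_pos hlen]
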